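-- pv_equiv track=rewrite | github.com/Christdej/aoc | old_years/aoc2022/day01/day1.py | sum_with_spaces
-- ===== SOURCE A (Python) =====
-- def sum_with_spaces(list):
--     sums = []
--     temp_sum = 0
--     for i in list:
--         if i == -1:
--             sums.append(temp_sum)
--             temp_sum = 0
--         else:
--             temp_sum += i
--     return sums
-- ===== SOURCE B (Python) =====
-- def sum_with_spaces(list):
--     # Two-phase: partition into groups at -1 markers, then sum each closed group.
--     groups = [[]]
--     for i in list:
--         if i == -1:
--             groups.append([])
--         else:
--             groups[-1].append(i)
--     return [sum(g) for g in groups[:-1]]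
-- ===== Notes on version B (the rewrite author's own statement) =====
-- stated objective: alternative
-- what changed: B partitions the input into groups at -1 markers in one pass and then sums each closed group in a second pass, instead of A's single streaming accumulator that emits a running sum at each -1.
import Mathlib
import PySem

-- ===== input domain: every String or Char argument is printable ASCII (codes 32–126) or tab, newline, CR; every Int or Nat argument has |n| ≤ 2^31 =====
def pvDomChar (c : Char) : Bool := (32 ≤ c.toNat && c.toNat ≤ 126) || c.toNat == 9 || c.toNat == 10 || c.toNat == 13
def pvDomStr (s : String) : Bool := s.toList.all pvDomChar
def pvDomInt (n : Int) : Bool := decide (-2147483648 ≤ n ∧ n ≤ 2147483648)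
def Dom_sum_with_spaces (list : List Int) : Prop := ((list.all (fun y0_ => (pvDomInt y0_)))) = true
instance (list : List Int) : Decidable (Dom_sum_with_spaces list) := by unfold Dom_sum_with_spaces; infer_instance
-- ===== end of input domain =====

-- ===== PORT A =====
-- Port of A: streaming fold keeping (sums, temp_sum).
def sum_with_spaces (list : List Int) : List Int :=
  (list.foldl (fun (st : List Int × Int) i =>
    if i = -1 then (st.1 ++ [st.2], 0) else (st.1, st.2 + i)) ([], 0)).1

-- ===== PORT B =====
-- B helpers: one pass builds the groups, a second pass sums the closed ones.
def bStep (groups : List (List Int)) (i : Int) : List (List Int) :=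
  if i = -1 then groups ++ [[]]
  else groups.dropLast ++ [(groups.getLastD []) ++ [i]]

def sum_with_spaces_alt (list : List Int) : List Int :=
  ((list.foldl bStep [[]]).dropLast).map (fun g => g.foldl (· + ·) 0)

-- ===== PRECONDITION & SPEC =====
def Spec_sum_with_spaces (list : List Int) (out : List Int) : Prop := out = sum_with_spaces_alt list
instance (list : List Int) (out : List Int) : Decidable (Spec_sum_with_spaces list out) := by unfold Spec_sum_with_spaces; infer_instance

-- ===== CLAIM (what is proved, stated in full; the proofs are below) =====
def Claim_equal_sum_with_spaces : Prop := ∀ (list : List Int), Dom_sum_with_spaces list → Spec_sum_with_spaces list (sum_with_spaces list)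

-- ===== LEMMAS AND PROOFS =====

-- ===== VERDICT (by name: the statement is the Claim_ definition above) =====
lemma sws_key (l : List Int) (gs : List (List Int)) (c : List Int) :
    (l.foldl (fun (st : List Int × Int) i =>
      if i = -1 then (st.1 ++ [st.2], 0) else (st.1, st.2 + i))
      (gs.map (fun g => g.foldl (· + ·) 0), c.foldl (· + ·) 0)).1
    = ((l.foldl bStep (gs ++ [c])).dropLast).map (fun g => g.foldl (· + ·) 0) := by
  induction l generalizing gs c with
  | nil => simp
  | cons i l ih =>
    by_cases h : i = -1
    · subst h
      simp only [List.foldl_cons, bStep]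
      have := ih (gs ++ [c]) []
      simpa using this
    · simp only [List.foldl_cons, bStep, if_neg h]
      have := ih gs (c ++ [i])
      simp only [List.foldl_append, List.foldl_cons, List.foldl_nil] at this
      rw [show (gs ++ [c]).dropLast = gs by simp,
          show (gs ++ [c]).getLastD [] = c by simp]
      exact this

theorem sum_with_spaces_spec : Claim_equal_sum_with_spaces := by
  intro list _
  unfold Spec_sum_with_spaces sum_with_spaces sum_with_spaces_alt
  have := sws_key list [] []
  simpa using this
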